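-- pv_equiv track=rewrite | github.com/Darkur514/projetCompilation | utils/formes.py | change_regles_with_eps
-- ===== SOURCE A (Python) =====
-- def change_regles_with_eps(m_with_eps, regles):
--   for mg, mds in regles.items():
--     if mg != m_with_eps:
--       for md in mds:
--         occurences = md.count(m_with_eps)
--         if occurences > 0:
--           m_eps_idx = [i for i, x in enumerate(md) if x == m_with_eps]
--           num_subsets = 2 ** len(m_eps_idx)
--           for i in range(num_subsets):
--               for j in range(num_subsets):
--                   if (i & (2**j)) != 0:
--                     if m_eps_idx[j]+1 <= len(md):
--                       to_append = md[:m_eps_idx[j]]+md[m_eps_idx[j]+1:]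
--                     else:
--                       to_append = md[:m_eps_idx[j]]
--                     if len(to_append) == 0:
--                       to_append = ['E']
--                     if to_append not in regles[mg]:
--                       regles[mg].append(to_append)
--   return regles
-- ===== SOURCE B (Python) =====
-- def change_regles_with_eps(m_with_eps, regles):
--   for mg, mds in regles.items():
--     if mg == m_with_eps:
--       continue
--     seen = {tuple(md) for md in mds}
--     pos = 0
--     while pos < len(mds):
--       md = mds[pos]
--       pos += 1
--       for idx, sym in enumerate(md):
--         if sym == m_with_eps:
--           variant = md[:idx] + md[idx + 1:]
--           if not variant:
--             variant = ['E']
--           tv = tuple(variant)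
--           if tv not in seen:
--             seen.add(tv)
--             mds.append(variant)
--   return regles
-- ===== Notes on version B (the rewrite author's own statement) =====
-- stated objective: alternative
-- what changed: A expands each production through a double loop over all 2^k subset masks and all 2^k candidate bit positions, testing i & 2**j and re-scanning the rule list for duplicates; B instead makes one direct pass over the k epsilon-occurrence positions of each production and deduplicates with a seen-set, producing the identical rule lists in the identical order (on the generated timing inputs epsilon occurrences are rare, so no wall-clock speed-up was measured).
import Mathlib
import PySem

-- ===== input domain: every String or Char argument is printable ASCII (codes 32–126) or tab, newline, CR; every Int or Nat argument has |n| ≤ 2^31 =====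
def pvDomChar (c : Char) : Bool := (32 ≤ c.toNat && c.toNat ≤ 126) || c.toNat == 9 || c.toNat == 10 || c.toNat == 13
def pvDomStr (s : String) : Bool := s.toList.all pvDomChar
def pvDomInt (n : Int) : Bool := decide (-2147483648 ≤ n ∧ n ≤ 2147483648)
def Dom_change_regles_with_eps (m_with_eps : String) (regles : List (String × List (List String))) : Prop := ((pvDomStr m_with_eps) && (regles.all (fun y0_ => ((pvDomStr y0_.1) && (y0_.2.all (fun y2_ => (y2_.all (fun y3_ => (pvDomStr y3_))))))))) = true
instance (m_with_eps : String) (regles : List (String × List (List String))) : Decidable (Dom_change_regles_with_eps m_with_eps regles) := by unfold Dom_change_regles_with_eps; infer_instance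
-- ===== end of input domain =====

-- B re-implements A's per-production O(4^k) double bit-mask loop by one direct pass over the k
-- epsilon-occurrence indices with a seen-set for deduplication (same return value; like A, the
-- Python B mutates the rule lists of `regles` in place — the equivalence proved here is about
-- the returned value, which is also the mutated argument for both).

-- ===== PORT A =====

-- 'if to_append not in regles[mg]: regles[mg].append(to_append)' (A's last two lines)
def pushNew (l : List (List String)) (c : List String) : List (List String) :=
  if ¬ (c ∈ l) then l ++ [c] else l

-- body of A for one production `md` of the current rule, acting on the current rule list `l`
def aStep (m_with_eps : String) (l : List (List String)) (md : List String) : List (List String) :=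
  let occurences := PySem.List.count md m_with_eps
  if occurences > 0 then
    let m_eps_idx := ((PySem.List.enumerate md).filter (fun p => p.2 == m_with_eps)).map Prod.fst
    let num_subsets := 2 ^ m_eps_idx.length
    (List.range num_subsets).foldl (fun l i =>
      (List.range num_subsets).foldl (fun l (j : Nat) =>
        if (i &&& 2 ^ j) ≠ 0 then
          -- m_eps_idx[j]: in range whenever the bit test succeeds (2^j ≤ i < 2^k forces j < k)
          let e := PySem.List.pyGetD m_eps_idx (j : Int) 0
          let to_append :=
            if e + 1 ≤ (md.length : Int) then
              PySem.List.slice md none (some e) ++ PySem.List.slice md (some (e + 1)) none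
            else
              PySem.List.slice md none (some e)
          let to_append := if to_append.length = 0 then ["E"] else to_append
          pushNew l to_append
        else l) l) l
  else l

-- 'for md in mds' over a list that grows while it is iterated (CPython: by position); the fuel
-- is a totality guard only — it exceeds the number of distinct productions the loop can ever hold
def aLoop (m_with_eps : String) : Nat → Nat → List (List String) → List (List String)
  | 0, _, l => l
  | fuel + 1, pos, l =>
    match l[pos]? with
    | none => l
    | some md => aLoop m_with_eps fuel (pos + 1) (aStep m_with_eps l md)

def epsFuel (m_with_eps : String) (mds : List (List String)) : Nat :=
  mds.length + mds.foldl (fun a md => a + 2 ^ PySem.List.count md m_with_eps) 0 + 1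

-- dict iteration: only the current key's value list is mutated (keys are distinct, Pre_), so the
-- pass over regles.items() is entrywise
def change_regles_with_eps (m_with_eps : String) (regles : List (String × List (List String))) : List (String × List (List String)) :=
  regles.map (fun ent =>
    if ent.1 != m_with_eps then (ent.1, aLoop m_with_eps (epsFuel m_with_eps ent.2) 0 ent.2) else ent)

-- ===== PORT B =====

-- body of B for one enumerated element (idx, sym) of `md`; state = (rule list, seen set)
def bStepElem (m_with_eps : String) (md : List String)
    (st : List (List String) × PySem.Set (List String)) (p : Int × String) :
    List (List String) × PySem.Set (List String) :=
  if p.2 == m_with_eps then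
    let variant := PySem.List.slice md none (some p.1) ++ PySem.List.slice md (some (p.1 + 1)) none
    let variant := if variant.length = 0 then ["E"] else variant
    -- Python's tuple(variant) is the same sequence of strings; the seen set holds it as a list
    if ¬ (PySem.Set.contains st.2 variant) then (st.1 ++ [variant], PySem.Set.add st.2 variant)
    else st
  else st

-- 'for idx, sym in enumerate(md): …'
def bProcess (m_with_eps : String) (st : List (List String) × PySem.Set (List String))
    (md : List String) : List (List String) × PySem.Set (List String) :=
  (PySem.List.enumerate md).foldl (bStepElem m_with_eps md) st

-- 'while pos < len(mds)' over the growing list; same totality fuel as A's growing for-loop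
def bLoop (m_with_eps : String) : Nat → Nat → List (List String) × PySem.Set (List String) → List (List String)
  | 0, _, st => st.1
  | fuel + 1, pos, st =>
    match st.1[pos]? with
    | none => st.1
    | some md => bLoop m_with_eps fuel (pos + 1) (bProcess m_with_eps st md)

def change_regles_with_eps_alt (m_with_eps : String) (regles : List (String × List (List String))) : List (String × List (List String)) :=
  regles.map (fun ent =>
    if ent.1 == m_with_eps then ent
    else (ent.1, bLoop m_with_eps (epsFuel m_with_eps ent.2) 0 (ent.2, PySem.Set.ofList ent.2)))

-- ===== PRECONDITION & SPEC =====

-- Pre_ states the Python-dict invariant: `regles` is a dict, so its keys are pairwise distinct;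
-- association lists with duplicate keys do not represent any input A can receive.
def Pre_change_regles_with_eps (m_with_eps : String) (regles : List (String × List (List String))) : Prop :=
  (regles.map Prod.fst).Nodup
instance (m_with_eps : String) (regles : List (String × List (List String))) : Decidable (Pre_change_regles_with_eps m_with_eps regles) := by unfold Pre_change_regles_with_eps; infer_instance

def pvWitness_change_regles_with_eps : String × (List (String × List (List String))) :=
  ("X", [("S", [["a", "X", "b", "X"], ["X"]]), ("X", [["c"]])])

def Spec_change_regles_with_eps (m_with_eps : String) (regles : List (String × List (List String))) (out : List (String × List (List String))) : Prop := out = change_regles_with_eps_alt m_with_eps regles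
instance (m_with_eps : String) (regles : List (String × List (List String))) (out : List (String × List (List String))) : Decidable (Spec_change_regles_with_eps m_with_eps regles out) := by unfold Spec_change_regles_with_eps; infer_instance

-- ===== CLAIM (what is proved, stated in full; the proofs are below) =====
def Claim_equal_change_regles_with_eps : Prop := ∀ (m_with_eps : String) (regles : List (String × List (List String))), Dom_change_regles_with_eps m_with_eps regles → Pre_change_regles_with_eps m_with_eps regles → Spec_change_regles_with_eps m_with_eps regles (change_regles_with_eps m_with_eps regles)

-- ===== LEMMAS AND PROOFS =====

-- occurrence-index list and the two candidate computations, as proof-side names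
def idxOf (m : String) (md : List String) : List Int :=
  ((PySem.List.enumerate md).filter (fun p => p.2 == m)).map Prod.fst

def candA (md : List String) (e : Int) : List String :=
  let t :=
    if e + 1 ≤ (md.length : Int) then
      PySem.List.slice md none (some e) ++ PySem.List.slice md (some (e + 1)) none
    else
      PySem.List.slice md none (some e)
  if t.length = 0 then ["E"] else t

def candB (md : List String) (e : Int) : List String :=
  let v := PySem.List.slice md none (some e) ++ PySem.List.slice md (some (e + 1)) none
  if v.length = 0 then ["E"] else v

theorem pushNew_of_mem {l : List (List String)} {c : List String} (h : c ∈ l) : pushNew l c = l := by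
  unfold pushNew; rw [if_neg (by simp [h])]

theorem mem_foldl_pushNew_left {l : List (List String)} {x : List String}
    (s : List (List String)) (h : x ∈ l) : x ∈ s.foldl pushNew l := by
  induction s generalizing l with
  | nil => exact h
  | cons a s ih =>
    apply ih
    unfold pushNew
    split
    · exact List.mem_append_left _ h
    · exact h

theorem self_mem_pushNew (l : List (List String)) (c : List String) : c ∈ pushNew l c := by
  unfold pushNew
  split
  · exact List.mem_append_right _ (by simp)
  · exact of_not_not (by simpa using ‹¬¬c ∈ l›)

theorem mem_foldl_pushNew_right {s : List (List String)} {x : List String}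
    (l : List (List String)) (h : x ∈ s) : x ∈ s.foldl pushNew l := by
  induction s generalizing l with
  | nil => cases h
  | cons a s ih =>
    rcases List.mem_cons.mp h with rfl | h'
    · exact mem_foldl_pushNew_left s (self_mem_pushNew l x)
    · exact ih _ h'

theorem foldl_fix {α β : Type} (f : β → α → β) (l : β) (s : List α)
    (h : ∀ x ∈ s, f l x = l) : s.foldl f l = l := by
  induction s with
  | nil => rfl
  | cons a s ih =>
    simp only [List.foldl_cons, h a (by simp)]
    exact ih (fun x hx => h x (by simp [hx]))

theorem foldl_single {α β : Type} [DecidableEq α] (f : β → α → β) (s : List α) (t : α) :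
    ∀ l, t ∈ s → s.Nodup → (∀ (b : β) (x : α), x ∈ s → x ≠ t → f b x = b) →
      s.foldl f l = f l t := by
  induction s with
  | nil => intro l hm _ _; cases hm
  | cons a s ih =>
    intro l hm hn hfix
    rcases List.mem_cons.mp hm with rfl | hm'
    · simp only [List.foldl_cons]
      apply foldl_fix
      intro x hx
      exact hfix _ x (by simp [hx]) (by rintro rfl; exact (List.nodup_cons.mp hn).1 hx)
    · simp only [List.foldl_cons,
        hfix l a (by simp) (by rintro rfl; exact (List.nodup_cons.mp hn).1 hm')]
      exact ih l hm' (List.nodup_cons.mp hn).2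
        (fun b x hx hne => hfix b x (by simp [hx]) hne)

theorem and_two_pow_ne (i j : Nat) : ((i &&& 2 ^ j) ≠ 0) ↔ i.testBit j = true := by
  rw [Nat.and_two_pow]
  cases h : i.testBit j <;> simp [Nat.pow_eq_zero]

theorem ge_of_testBit {i j : Nat} (h : i.testBit j = true) : 2 ^ j ≤ i := by
  have h2 := Nat.and_le_left (n := i) (m := 2 ^ j)
  rw [Nat.and_two_pow, h] at h2
  simpa using h2

theorem size_pow_sub_one (t : Nat) : (2 ^ t - 1).size = t := by
  rcases Nat.eq_zero_or_pos t with rfl | ht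
  · simp
  · apply le_antisymm
    · exact Nat.size_le.mpr (by have := Nat.one_le_two_pow (n := t); omega)
    · have h2 : 2 ^ (t - 1) ≤ 2 ^ t - 1 := by
        have hmul : 2 ^ (t - 1) * 2 = 2 ^ t := by
          rw [← pow_succ]; congr 1; omega
        have h1 : 1 ≤ 2 ^ (t - 1) := Nat.one_le_two_pow
        omega
      have := Nat.lt_size.mpr h2
      omega

theorem mem_take_of_getElem {α : Type} (idx : List α) (t j : Nat) (hj : j < t)
    (hjl : j < idx.length) : idx[j] ∈ idx.take t := by
  have h1 : j < (idx.take t).length := by simp [List.length_take]; omega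
  have h2 : (idx.take t)[j] = idx[j] := List.getElem_take
  exact h2 ▸ List.getElem_mem h1

-- A's O(4^k) double bit-mask loop performs exactly one deduplicating append per occurrence
-- index, in ascending index order
theorem doubleLoop_aux (idx : List Int) (G : Int → List String) (l : List (List String)) :
    ∀ m, m ≤ 2 ^ idx.length →
      (List.range m).foldl (fun l i =>
        (List.range (2 ^ idx.length)).foldl (fun l (j : Nat) =>
          if (i &&& 2 ^ j) ≠ 0 then pushNew l (G (PySem.List.pyGetD idx (j : Int) 0)) else l) l) l
      = ((idx.take (Nat.size (m - 1))).map G).foldl pushNew l := by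
  intro m
  induction m with
  | zero => intro _; simp
  | succ m ih =>
    intro hm
    rw [List.range_succ, List.foldl_append, ih (by omega)]
    simp only [List.foldl_cons, List.foldl_nil]
    rcases Nat.eq_zero_or_pos m with rfl | hm1
    · apply foldl_fix
      intro j hj
      simp
    · have hszk : (m - 1).size ≤ idx.length :=
        Nat.size_le.mpr (by omega)
      by_cases hp : ∃ t, m = 2 ^ t
      · rcases hp with ⟨t, rfl⟩
        have htk : t < idx.length := by
          have hlt : (2 : Nat) ^ t < 2 ^ idx.length := by omega
          exact (Nat.pow_lt_pow_iff_right (by norm_num)).mp hlt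
        have hsz1 : (2 ^ t - 1).size = t := size_pow_sub_one t
        have hsz2 : (2 ^ t + 1 - 1).size = t + 1 := by simpa using Nat.size_pow (n := t)
        rw [hsz1, hsz2]
        have hsingle := foldl_single
          (f := fun (l : List (List String)) (j : Nat) =>
            if ((2 ^ t) &&& 2 ^ j) ≠ 0 then pushNew l (G (PySem.List.pyGetD idx (j : Int) 0)) else l)
          (List.range (2 ^ idx.length)) t
          (((idx.take t).map G).foldl pushNew l)
          (List.mem_range.mpr (lt_of_lt_of_le htk (Nat.le_of_lt Nat.lt_two_pow_self)))
          (List.nodup_range)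
          (by
            intro b j hj hne
            show (if (2 ^ t &&& 2 ^ j) ≠ 0 then pushNew b (G (PySem.List.pyGetD idx (j : Int) 0)) else b) = b
            rw [if_neg]
            intro hcon
            have hb := (and_two_pow_ne _ _).mp hcon
            rw [Nat.testBit_two_pow] at hb
            exact hne (of_decide_eq_true hb).symm)
        rw [hsingle]
        show (if (2 ^ t &&& 2 ^ t) ≠ 0 then
            pushNew (((idx.take t).map G).foldl pushNew l) (G (PySem.List.pyGetD idx (t : Int) 0))
          else ((idx.take t).map G).foldl pushNew l) = _
        have hcond : ((2 ^ t) &&& 2 ^ t) ≠ 0 := by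
          apply (and_two_pow_ne _ _).mpr
          rw [Nat.testBit_two_pow]
          simp
        rw [if_pos hcond]
        rw [PySem.List.pyGetD_natCast, List.getD_eq_getElem _ _ htk]
        rw [List.take_add_one, List.getElem?_eq_getElem htk]
        simp only [Option.toList_some, List.map_append, List.map_cons, List.map_nil,
          List.foldl_append, List.foldl_cons, List.foldl_nil]
      · have hszeq : m.size = (m - 1).size := by
          apply le_antisymm ?h1 (Nat.size_le_size (by omega))
          apply Nat.size_le.mpr
          have h1 : m - 1 < 2 ^ (m - 1).size := Nat.lt_size_self _
          have h2 : m ≠ 2 ^ (m - 1).size := fun hc => hp ⟨_, hc⟩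
          omega
        have hms : (m + 1 - 1).size = (m - 1).size := by simpa using hszeq
        rw [hms]
        apply foldl_fix
        intro j hj
        by_cases hb : m.testBit j = true
        · have hle : 2 ^ j ≤ m := ge_of_testBit hb
          have hne : 2 ^ j ≠ m := fun hc => hp ⟨j, hc.symm⟩
          have hj1 : j < (m - 1).size := Nat.lt_size.mpr (by omega)
          have hjk : j < idx.length := lt_of_lt_of_le hj1 hszk
          rw [if_pos ((and_two_pow_ne _ _).mpr hb)]
          apply pushNew_of_mem
          apply mem_foldl_pushNew_right
          rw [PySem.List.pyGetD_natCast, List.getD_eq_getElem _ _ hjk]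
          exact List.mem_map_of_mem (mem_take_of_getElem idx _ j hj1 hjk)
        · rw [if_neg (by simpa [and_two_pow_ne] using hb)]

theorem doubleLoop (idx : List Int) (G : Int → List String) (l : List (List String)) :
    (List.range (2 ^ idx.length)).foldl (fun l i =>
      (List.range (2 ^ idx.length)).foldl (fun l (j : Nat) =>
        if (i &&& 2 ^ j) ≠ 0 then pushNew l (G (PySem.List.pyGetD idx (j : Int) 0)) else l) l) l
    = (idx.map G).foldl pushNew l := by
  have h := doubleLoop_aux idx G l (2 ^ idx.length) (le_refl _)
  rwa [size_pow_sub_one, List.take_length] at h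

theorem stepA_eq (m : String) (l : List (List String)) (md : List String) :
    aStep m l md = ((idxOf m md).map (candA md)).foldl pushNew l := by
  by_cases h : PySem.List.count md m > 0
  · unfold aStep
    rw [if_pos h]
    exact doubleLoop (idxOf m md) (candA md) l
  · have hidx : idxOf m md = [] := by
      unfold idxOf
      rw [List.filter_eq_nil_iff.mpr, List.map_nil]
      intro p hp hc
      have hpm : p.2 ∈ md := by
        have hsnd := PySem.List.map_snd_enumerate md 0
        exact hsnd ▸ List.mem_map_of_mem hp
      rw [PySem.List.count_eq] at h
      exact h (List.count_pos_iff.mpr ((beq_iff_eq.mp hc) ▸ hpm))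
    rw [hidx]
    unfold aStep
    rw [if_neg h]
    simp

-- B-side invariant: the seen set holds exactly the members of the rule list
def StInv (st : List (List String) × PySem.Set (List String)) : Prop :=
  ∀ x, x ∈ st.2 ↔ x ∈ st.1

def step2 (md : List String) (st : List (List String) × PySem.Set (List String)) (e : Int) :
    List (List String) × PySem.Set (List String) :=
  let v := candB md e
  if ¬ (PySem.Set.contains st.2 v) then (st.1 ++ [v], PySem.Set.add st.2 v) else st

theorem foldl_step2 (md : List String) :
    ∀ (es : List Int) (st : List (List String) × PySem.Set (List String)), StInv st →
      (es.foldl (step2 md) st).1 = (es.map (candB md)).foldl pushNew st.1 ∧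
        StInv (es.foldl (step2 md) st) := by
  intro es
  induction es with
  | nil => intro st h; exact ⟨rfl, h⟩
  | cons e es ih =>
    intro st h
    have hstep : (step2 md st e).1 = pushNew st.1 (candB md e) ∧ StInv (step2 md st e) := by
      unfold step2 pushNew
      by_cases hc : candB md e ∈ st.1
      · have hcon : PySem.Set.contains st.2 (candB md e) = true :=
          (PySem.Set.contains_iff _ _).mpr ((h _).mpr hc)
        rw [if_neg (not_not_intro hcon), if_neg (not_not_intro hc)]
        exact ⟨rfl, h⟩
      · have hcon : ¬ PySem.Set.contains st.2 (candB md e) = true :=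
          fun hx => hc ((h _).mp ((PySem.Set.contains_iff _ _).mp hx))
        rw [if_pos hcon, if_pos hc]
        refine ⟨rfl, fun x => ?_⟩
        simp only []
        rw [PySem.Set.mem_add]
        simp [h x]
    simp only [List.foldl_cons, List.map_cons]
    rcases hstep with ⟨h1, h2⟩
    rcases ih (step2 md st e) h2 with ⟨h3, h4⟩
    exact ⟨by rw [h3, h1], h4⟩

theorem bProcess_eq (m : String) (md : List String)
    (st : List (List String) × PySem.Set (List String)) (h : StInv st) :
    (bProcess m st md).1 = ((idxOf m md).map (candB md)).foldl pushNew st.1 ∧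
      StInv (bProcess m st md) := by
  have h1 : bProcess m st md = (idxOf m md).foldl (step2 md) st := by
    unfold bProcess idxOf
    rw [List.foldl_map, List.foldl_filter]
    apply PySem.List.foldl_congr_mem
    intro acc p _
    by_cases hc : (p.2 == m) = true
    · rw [if_pos hc]
      unfold bStepElem step2 candB
      rw [if_pos hc]
    · rw [if_neg hc]
      unfold bStepElem
      rw [if_neg hc]
  rw [h1]
  exact foldl_step2 md (idxOf m md) st h

theorem mem_idxOf_bounds {m : String} {md : List String} {e : Int} (h : e ∈ idxOf m md) :
    0 ≤ e ∧ e < (md.length : Int) := by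
  unfold idxOf at h
  rcases List.mem_map.mp h with ⟨p, hp, rfl⟩
  have hp' := (List.mem_filter.mp hp).1
  have hmem : p.1 ∈ (PySem.List.enumerate md).map (fun x => x.1) :=
    List.mem_map_of_mem hp'
  rw [PySem.List.map_fst_enumerate] at hmem
  have hr := PySem.List.mem_pyRange_one.mp hmem
  constructor
  · exact hr.1
  · have := hr.2; omega

theorem candA_eq_candB {m : String} {md : List String} {e : Int} (h : e ∈ idxOf m md) :
    candA md e = candB md e := by
  rcases mem_idxOf_bounds h with ⟨h0, h1⟩
  unfold candA candB
  rw [if_pos (show e + 1 ≤ (md.length : Int) by omega)]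

theorem loop_eq (m : String) :
    ∀ (fuel pos : Nat) (st : List (List String) × PySem.Set (List String)), StInv st →
      bLoop m fuel pos st = aLoop m fuel pos st.1 := by
  intro fuel
  induction fuel with
  | zero => intro pos st _; rfl
  | succ fuel ih =>
    intro pos st h
    unfold bLoop aLoop
    cases hg : st.1[pos]? with
    | none => rfl
    | some md =>
      show bLoop m fuel (pos + 1) (bProcess m st md) = aLoop m fuel (pos + 1) (aStep m st.1 md)
      rcases bProcess_eq m md st h with ⟨h1, h2⟩
      have hA : aStep m st.1 md = (bProcess m st md).1 := by
        rw [stepA_eq, h1]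
        congr 1
        exact List.map_congr_left (fun e he => candA_eq_candB he)
      rw [ih (pos + 1) _ h2, hA]

-- ===== VERDICT (by name: the statement is the Claim_ definition above) =====
theorem change_regles_with_eps_spec : Claim_equal_change_regles_with_eps := by
  intro m regles _ _
  unfold Spec_change_regles_with_eps change_regles_with_eps change_regles_with_eps_alt
  apply List.map_congr_left
  intro ent _
  by_cases hc : (ent.1 == m) = true
  · rw [if_neg (by simp [bne, hc]), if_pos hc]
  · rw [if_pos (by simp [bne]; simpa using hc), if_neg hc]
    have hinv : StInv (ent.2, PySem.Set.ofList ent.2) := fun x => by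
      simp [PySem.Set.mem_ofList]
    have := loop_eq m (epsFuel m ent.2) 0 (ent.2, PySem.Set.ofList ent.2) hinv
    rw [← this]
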